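-- pv_equiv track=rewrite | github.com/tobiasvl/adventofcode | 2024/day02/day02.py | judge_safety
-- ===== SOURCE A (Python) =====
-- def judge_safety(report):
--     if report != sorted(report) and report != sorted(report, reverse=True):
--         return False
--
--     for i in range(1, len(report)):
--         diff = abs(report[i] - report[i - 1])
--         if diff > 0 and diff < 4:
--             pass
--         else:
--             return False
--
--     return True
-- ===== SOURCE B (Python) =====
-- def judge_safety(report):
--     inc = dec = False
--     for a, b in zip(report, report[1:]):
--         d = b - a
--         if not (1 <= abs(d) <= 3):
--             return False
--         if d > 0:
--             inc = True
--         else: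
--             dec = True
--         if inc and dec:
--             return False
--     return True
-- ===== Notes on version B (the rewrite author's own statement) =====
-- stated objective: alternative
-- what changed: A compares the list against two full sorted() copies and then loops over indices; B makes one pass over adjacent pairs tracking increase/decrease flags, with no sorting and early exit on the first violation.
import Mathlib
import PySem

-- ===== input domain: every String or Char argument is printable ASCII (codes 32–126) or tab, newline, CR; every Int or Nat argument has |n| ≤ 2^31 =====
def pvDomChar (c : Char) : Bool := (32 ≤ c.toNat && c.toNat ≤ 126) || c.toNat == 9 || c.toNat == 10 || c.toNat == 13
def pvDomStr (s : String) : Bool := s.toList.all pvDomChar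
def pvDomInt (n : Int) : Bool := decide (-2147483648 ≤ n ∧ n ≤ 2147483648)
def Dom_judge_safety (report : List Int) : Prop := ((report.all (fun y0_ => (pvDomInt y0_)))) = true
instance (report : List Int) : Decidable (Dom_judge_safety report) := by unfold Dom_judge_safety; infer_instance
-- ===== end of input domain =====

-- B replaces A's two sorted() comparisons plus an index loop by one pass over adjacent pairs
-- tracking increase/decrease flags (objective: alternative single-pass algorithm, no sorting).

-- ===== PORT A =====
-- A's for-loop over range(1, len(report)) with early return, as recursion over the index list;
-- every index it reads is in range, so report[i] is pyGetD (exact here).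
def judgeLoopA (report : List Int) : List Int → Bool
  | [] => true
  | i :: rest =>
    let diff := |PySem.List.pyGetD report i 0 - PySem.List.pyGetD report (i - 1) 0|
    if 0 < diff ∧ diff < 4 then judgeLoopA report rest
    else false

def judge_safety (report : List Int) : Bool :=
  if report ≠ PySem.List.sorted report (fun x => x) false ∧
     report ≠ PySem.List.sorted report (fun x => x) true then false
  else judgeLoopA report (PySem.List.pyRange 1 (report.length : Int) 1)

-- ===== PORT B =====
-- B's single pass over zip(report, report[1:]) (report[1:] = drop 1, exact) with inc/dec flags.
def judgeLoopB : List (Int × Int) → Bool → Bool → Bool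
  | [], _, _ => true
  | (a, b) :: rest, inc, dec =>
    let d := b - a
    if ¬ (1 ≤ |d| ∧ |d| ≤ 3) then false
    else
      let inc' := if 0 < d then true else inc
      let dec' := if 0 < d then dec else true
      if inc' && dec' then false else judgeLoopB rest inc' dec'

def judge_safety_alt (report : List Int) : Bool :=
  judgeLoopB (report.zip (report.drop 1)) false false

-- ===== PRECONDITION & SPEC =====
def Spec_judge_safety (report : List Int) (out : Bool) : Prop := out = judge_safety_alt report
instance (report : List Int) (out : Bool) : Decidable (Spec_judge_safety report out) := by unfold Spec_judge_safety; infer_instance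

-- ===== CLAIM (what is proved, stated in full; the proofs are below) =====
def Claim_equal_judge_safety : Prop := ∀ (report : List Int), Dom_judge_safety report → Spec_judge_safety report (judge_safety report)

-- ===== LEMMAS AND PROOFS =====

-- A's loop returns true iff every visited index passes the diff test.
theorem judgeLoopA_iff (report : List Int) (idxs : List Int) :
    judgeLoopA report idxs = true ↔
      ∀ i ∈ idxs, 0 < |PySem.List.pyGetD report i 0 - PySem.List.pyGetD report (i - 1) 0| ∧
        |PySem.List.pyGetD report i 0 - PySem.List.pyGetD report (i - 1) 0| < 4 := by
  induction idxs with
  | nil => simp [judgeLoopA]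
  | cons i rest ih =>
    simp only [judgeLoopA, List.mem_cons]
    split_ifs with h
    · rw [ih]
      constructor
      · rintro hr j (rfl | hj)
        · exact h
        · exact hr j hj
      · intro hall j hj
        exact hall j (Or.inr hj)
    · simp only [false_iff]
      intro hall
      exact h (hall i (Or.inl rfl))

-- A's indexing pattern report[i-1], report[i] for i in range(1, len), rewritten over Nat indices.
theorem range_pairs_iff (xs : List Int) (P : Int → Int → Prop) :
    (∀ i ∈ PySem.List.pyRange 1 (xs.length : Int) 1,
        P (PySem.List.pyGetD xs i 0) (PySem.List.pyGetD xs (i - 1) 0)) ↔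
      ∀ k, (h : k + 1 < xs.length) → P xs[k + 1] xs[k] := by
  constructor
  · intro h k hk
    have hm : (((k + 1 : Nat)) : Int) ∈ PySem.List.pyRange 1 (xs.length : Int) 1 :=
      PySem.List.mem_pyRange_one.mpr ⟨by push_cast; omega, by push_cast; omega⟩
    have h2 := h _ hm
    rw [show (((k + 1 : Nat)) : Int) - 1 = ((k : Nat) : Int) by push_cast; ring] at h2
    rw [PySem.List.pyGetD_natCast, PySem.List.pyGetD_natCast] at h2
    rwa [List.getD_eq_getElem _ _ (by omega), List.getD_eq_getElem _ _ (by omega)] at h2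
  · intro h i hi
    rcases PySem.List.mem_pyRange_one.mp hi with ⟨h1, h2⟩
    obtain ⟨k, rfl⟩ : ∃ k : Nat, i = (((k + 1 : Nat)) : Int) := ⟨(i - 1).toNat, by omega⟩
    have hk : k + 1 < xs.length := by push_cast at h2; omega
    have h3 := h k hk
    rw [show (((k + 1 : Nat)) : Int) - 1 = ((k : Nat) : Int) by push_cast; ring]
    rw [PySem.List.pyGetD_natCast, PySem.List.pyGetD_natCast,
        List.getD_eq_getElem _ _ (by omega), List.getD_eq_getElem _ _ (by omega)]
    exact h3

-- membership in zip(xs, xs[1:]) is exactly the adjacent pairs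
theorem mem_zip_drop (xs : List Int) (p : Int × Int) :
    p ∈ xs.zip (xs.drop 1) ↔ ∃ k, ∃ _h : k + 1 < xs.length, p = (xs[k], xs[k + 1]) := by
  induction xs with
  | nil => simp
  | cons a t ih =>
    cases t with
    | nil => simp
    | cons b t' =>
      constructor
      · intro hp
        rcases List.mem_cons.mp hp with rfl | hp'
        · exact ⟨0, by simp, by simp⟩
        · rcases ih.mp hp' with ⟨k, hk, rfl⟩
          exact ⟨k + 1, by simpa using hk, by simp⟩
      · rintro ⟨k, hk, rfl⟩
        cases k with
        | zero => exact List.mem_cons.mpr (Or.inl (by simp))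
        | succ k' =>
          refine List.mem_cons.mpr (Or.inr (ih.mpr ⟨k', by simpa using hk, by simp⟩))

theorem zip_all_adj (xs : List Int) (P : Int → Int → Prop) :
    (∀ p ∈ xs.zip (xs.drop 1), P p.1 p.2) ↔ ∀ k, (h : k + 1 < xs.length) → P xs[k] xs[k + 1] := by
  constructor
  · intro h k hk
    exact h _ ((mem_zip_drop xs _).mpr ⟨k, hk, rfl⟩)
  · intro h p hp
    rcases (mem_zip_drop xs p).mp hp with ⟨k, hk, rfl⟩
    exact h k hk

-- Closed form of B's flag-tracking loop.
theorem judgeLoopB_eq (pairs : List (Int × Int)) (inc dec : Bool) :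
    judgeLoopB pairs inc dec =
      (pairs.all (fun p => decide (1 ≤ |p.2 - p.1| ∧ |p.2 - p.1| ≤ 3)) &&
       !(inc && pairs.any (fun p => !decide (0 < p.2 - p.1))) &&
       !(dec && pairs.any (fun p => decide (0 < p.2 - p.1))) &&
       !(pairs.any (fun p => decide (0 < p.2 - p.1)) &&
         pairs.any (fun p => !decide (0 < p.2 - p.1)))) := by
  induction pairs generalizing inc dec with
  | nil => simp [judgeLoopB]
  | cons p rest ih =>
    obtain ⟨a, b⟩ := p
    have e : judgeLoopB ((a, b) :: rest) inc dec =
        (if ¬ (1 ≤ |b - a| ∧ |b - a| ≤ 3) then false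
         else
           (if (if (0 : Int) < b - a then true else inc) &&
               (if (0 : Int) < b - a then dec else true) then false
            else judgeLoopB rest (if (0 : Int) < b - a then true else inc)
              (if (0 : Int) < b - a then dec else true))) := rfl
    rw [e]
    simp only [List.all_cons, List.any_cons]
    by_cases hg : (1 ≤ |b - a| ∧ |b - a| ≤ 3)
    · rw [if_neg (fun hc => hc hg)]
      have hgd : decide (1 ≤ |b - a| ∧ |b - a| ≤ 3) = true := decide_eq_true hg
      by_cases hs : ((0 : Int) < b - a)
      · have hsd : decide ((0 : Int) < b - a) = true := decide_eq_true hs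
        rw [if_pos hs, if_pos hs, ih, hgd, hsd]
        cases inc <;> cases dec <;>
          cases hA : rest.all (fun p => decide (1 ≤ |p.2 - p.1| ∧ |p.2 - p.1| ≤ 3)) <;>
          cases hP : rest.any (fun p => decide (0 < p.2 - p.1)) <;>
          cases hN : rest.any (fun p => !decide (0 < p.2 - p.1)) <;>
          simp
      · have hsd : decide ((0 : Int) < b - a) = false := decide_eq_false hs
        rw [if_neg hs, if_neg hs, ih, hgd, hsd]
        cases inc <;> cases dec <;>
          cases hA : rest.all (fun p => decide (1 ≤ |p.2 - p.1| ∧ |p.2 - p.1| ≤ 3)) <;>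
          cases hP : rest.any (fun p => decide (0 < p.2 - p.1)) <;>
          cases hN : rest.any (fun p => !decide (0 < p.2 - p.1)) <;>
          simp
    · rw [if_pos hg]
      have hgd : decide (1 ≤ |b - a| ∧ |b - a| ≤ 3) = false := decide_eq_false hg
      rw [hgd]
      simp

-- Pairwise order on the whole list ↔ adjacent order.
theorem pairwise_le_adj (xs : List Int) :
    xs.Pairwise (fun a b : Int => a ≤ b) ↔ ∀ k, (h : k + 1 < xs.length) → xs[k] ≤ xs[k + 1] := by
  rw [← List.isChain_iff_pairwise, List.isChain_iff_getElem]

theorem pairwise_ge_adj (xs : List Int) :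
    xs.Pairwise (fun a b : Int => b ≤ a) ↔ ∀ k, (h : k + 1 < xs.length) → xs[k + 1] ≤ xs[k] := by
  rw [← @List.isChain_iff_pairwise Int (fun a b : Int => b ≤ a) xs ⟨fun h1 h2 => le_trans h2 h1⟩,
      List.isChain_iff_getElem]

-- A's sorted-equality tests ↔ adjacent monotonicity.
theorem sorted_self_iff (xs : List Int) :
    xs = PySem.List.sorted xs (fun x => x) false ↔
      ∀ k, (h : k + 1 < xs.length) → xs[k] ≤ xs[k + 1] := by
  rw [← pairwise_le_adj]
  constructor
  · intro he
    have h := PySem.List.sorted_pairwise (xs := xs) (key := fun x => x)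
    rw [← he] at h
    exact h
  · intro hp
    exact (PySem.List.sorted_eq_self_of_pairwise xs (fun x => x) hp).symm

theorem sorted_rev_self_iff (xs : List Int) :
    xs = PySem.List.sorted xs (fun x => x) true ↔
      ∀ k, (h : k + 1 < xs.length) → xs[k + 1] ≤ xs[k] := by
  rw [← pairwise_ge_adj]
  constructor
  · intro he
    have h := PySem.List.sorted_pairwise_rev (xs := xs) (key := fun x => x)
    rw [← he] at h
    exact h
  · intro hp
    exact (PySem.List.sorted_rev_eq_self_of_pairwise xs (fun x => x) hp).symm

-- characterisation of A
theorem A_char (xs : List Int) :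
    judge_safety xs = true ↔
      ((∀ k, (h : k + 1 < xs.length) → xs[k] ≤ xs[k + 1]) ∨
       (∀ k, (h : k + 1 < xs.length) → xs[k + 1] ≤ xs[k])) ∧
      ∀ k, (h : k + 1 < xs.length) →
        0 < |xs[k + 1] - xs[k]| ∧ |xs[k + 1] - xs[k]| < 4 := by
  unfold judge_safety
  split_ifs with h
  · simp only [false_iff]
    rintro ⟨hdir, -⟩
    rcases h with ⟨h1, h2⟩
    cases hdir with
    | inl hu => exact h1 ((sorted_self_iff xs).mpr hu)
    | inr hd => exact h2 ((sorted_rev_self_iff xs).mpr hd)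
  · have hdir : (∀ k, (h : k + 1 < xs.length) → xs[k] ≤ xs[k + 1]) ∨
        (∀ k, (h : k + 1 < xs.length) → xs[k + 1] ≤ xs[k]) := by
      rcases not_and_or.mp h with h1 | h2
      · exact Or.inl ((sorted_self_iff xs).mp (not_not.mp h1))
      · exact Or.inr ((sorted_rev_self_iff xs).mp (not_not.mp h2))
    rw [judgeLoopA_iff, range_pairs_iff xs (fun x y => 0 < |x - y| ∧ |x - y| < 4)]
    exact ⟨fun hg => ⟨hdir, hg⟩, fun ⟨_, hg⟩ => hg⟩

-- characterisation of B
theorem B_char (xs : List Int) :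
    judge_safety_alt xs = true ↔
      (∀ k, (h : k + 1 < xs.length) →
          1 ≤ |xs[k + 1] - xs[k]| ∧ |xs[k + 1] - xs[k]| ≤ 3) ∧
      ((∀ k, (h : k + 1 < xs.length) → ¬ (0 : Int) < xs[k + 1] - xs[k]) ∨
       (∀ k, (h : k + 1 < xs.length) → (0 : Int) < xs[k + 1] - xs[k])) := by
  unfold judge_safety_alt
  rw [judgeLoopB_eq]
  simp only [Bool.false_and, Bool.not_false, Bool.and_true]
  rw [Bool.and_eq_true, Bool.not_eq_true', Bool.and_eq_false_iff,
      List.all_eq_true, List.any_eq_false, List.any_eq_false]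
  simp only [decide_eq_true_eq, Bool.not_eq_true', decide_eq_false_iff_not, not_not]
  rw [zip_all_adj xs (fun x y => 1 ≤ |y - x| ∧ |y - x| ≤ 3),
      zip_all_adj xs (fun x y => ¬ (0 : Int) < y - x),
      zip_all_adj xs (fun x y => (0 : Int) < y - x)]

-- ===== VERDICT (by name: the statement is the Claim_ definition above) =====
theorem judge_safety_spec : Claim_equal_judge_safety := by
  intro report _
  unfold Spec_judge_safety
  rw [Bool.eq_iff_iff, A_char, B_char]
  have habs : ∀ d : Int, (0 < |d| ∧ |d| < 4) ↔ (1 ≤ |d| ∧ |d| ≤ 3) := by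
    intro d; generalize |d| = n; omega
  have hne : ∀ d : Int, 1 ≤ |d| → d ≠ 0 := by
    intro d hd; exact abs_pos.mp (by omega)
  constructor
  · rintro ⟨hdir, hg⟩
    refine ⟨fun k hk => (habs _).mp (hg k hk), ?_⟩
    cases hdir with
    | inl hu =>
      right; intro k hk
      have h1 := (habs _).mp (hg k hk)
      have h2 := hu k hk
      have := hne _ h1.1
      omega
    | inr hd =>
      left; intro k hk
      have h2 := hd k hk
      omega
  · rintro ⟨hg, hdir⟩
    refine ⟨?_, fun k hk => (habs _).mpr (hg k hk)⟩
    cases hdir with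
    | inl hn => right; intro k hk; have := hn k hk; omega
    | inr hp => left; intro k hk; have := hp k hk; omega
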